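-- pv_equiv track=rewrite | github.com/OrangePeelr/MultiVehicleSearch | findListings.py | vehicle_order_fit_slot
-- ===== SOURCE A (Python) =====
-- def vehicle_order_fit_slot(vehicle_order, location_slots):
--     listings_used = set()
--     for vehicle_len in vehicle_order:
--         updated = False
--         for i, slot in enumerate(location_slots):
--             if vehicle_len <= slot[1]:
--                 location_slots[i] = (slot[0], slot[1] - vehicle_len)
--                 updated = True
--                 listings_used.add(slot[0])
--                 break
--         if not updated:
--             return
--     return listings_used
-- ===== SOURCE B (Python) =====
-- # Alternative algorithm: segment tree over slot capacities (leftmost-fit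
-- # query + point update) instead of A's per-vehicle linear rescan.  Return
-- # value only: unlike A, B does not mutate location_slots in place.
--
-- def _build(caps):
--     # node: [maxcap] (leaf)  or  [maxcap, left_size, left, right]
--     n = len(caps)
--     if n == 1:
--         return [caps[0]]
--     k = n // 2
--     l = _build(caps[:k])
--     r = _build(caps[k:])
--     return [max(l[0], r[0]), k, l, r]
--
-- def _query(t, v):
--     # leftmost leaf index with capacity >= v, or None
--     if len(t) == 1:
--         return 0 if v <= t[0] else None
--     if v <= t[2][0]:
--         return _query(t[2], v)
--     j = _query(t[3], v)
--     return None if j is None else t[1] + j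
--
-- def _update(t, i, v):
--     # subtract v from the capacity at leaf index i
--     if len(t) == 1:
--         t[0] -= v
--         return
--     if i < t[1]:
--         _update(t[2], i, v)
--     else:
--         _update(t[3], i - t[1], v)
--     t[0] = max(t[2][0], t[3][0])
--
-- def vehicle_order_fit_slot(vehicle_order, location_slots):
--     if not location_slots:
--         return None if vehicle_order else set()
--     ids = [s[0] for s in location_slots]
--     t = _build([s[1] for s in location_slots])
--     used = set()
--     for v in vehicle_order:
--         idx = _query(t, v)
--         if idx is None:
--             return None
--         used.add(ids[idx])
--         _update(t, idx, v)
--     return used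
-- ===== Notes on version B (the rewrite author's own statement) =====
-- stated objective: alternative
-- what changed: Replaces A's per-vehicle linear rescan of location_slots by a segment tree over slot capacities (leftmost index with capacity >= len query, point update), with slot ids kept in a fixed side array and no in-place mutation of the input; asymptotically O((n+m) log m) vs A's O(n*m) worst case, but not measurably faster on the benchmark family, where first-fit hits near the front.
import Mathlib
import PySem

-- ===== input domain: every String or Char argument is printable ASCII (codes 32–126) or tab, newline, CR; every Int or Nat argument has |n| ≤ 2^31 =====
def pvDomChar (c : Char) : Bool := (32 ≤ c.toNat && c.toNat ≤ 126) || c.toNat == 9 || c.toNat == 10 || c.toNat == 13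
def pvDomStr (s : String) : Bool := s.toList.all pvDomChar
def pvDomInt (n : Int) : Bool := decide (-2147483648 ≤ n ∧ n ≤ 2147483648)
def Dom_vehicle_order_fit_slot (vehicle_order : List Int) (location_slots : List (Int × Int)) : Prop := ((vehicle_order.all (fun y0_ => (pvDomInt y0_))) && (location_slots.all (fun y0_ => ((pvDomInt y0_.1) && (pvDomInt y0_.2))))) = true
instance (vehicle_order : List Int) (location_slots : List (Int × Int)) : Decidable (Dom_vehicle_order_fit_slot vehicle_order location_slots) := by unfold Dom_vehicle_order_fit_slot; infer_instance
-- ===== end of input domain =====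

-- B: alternative algorithm — a segment tree over the slot capacities
-- (leftmost index with capacity >= len query, point update) instead of A's
-- per-vehicle linear rescan of the slot list.  The equivalence is about the
-- RETURN value only: A mutates location_slots in place, B does not.

-- ===== PORT A =====
-- inner 'for i, slot in enumerate(location_slots): …' loop, with the mutation and break:
-- returns the updated slots list and the id added to listings_used, or none if no slot fits
def aFind (v : Int) : List (Int × Int) → Option (List (Int × Int) × Int)
  | [] => none
  | s :: rest =>
      if v ≤ s.2 then some ((s.1, s.2 - v) :: rest, s.1)
      else
        match aFind v rest with
        | none => none
        | some (rs, u) => some (s :: rs, u)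

-- outer 'for vehicle_len in vehicle_order:' loop carrying the slots list and listings_used
def aLoop : List Int → List (Int × Int) → PySem.Set Int → Option (List Int)
  | [], _, used => some used
  | v :: vs, slots, used =>
      match aFind v slots with
      | none => none
      | some (slots', u) => aLoop vs slots' (PySem.Set.add used u)

def vehicle_order_fit_slot (vehicle_order : List Int) (location_slots : List (Int × Int)) : Option (List Int) :=
  aLoop vehicle_order location_slots PySem.Set.empty

-- ===== PORT B =====
-- segment tree node: leaf (capacity) or node (cached max, left size, left, right)
inductive Seg where
  | leaf : Int → Seg
  | node : Int → Nat → Seg → Seg → Seg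
deriving Repr

def Seg.maxv : Seg → Int
  | .leaf c => c
  | .node mx _ _ _ => mx

-- Source B _build: split the capacity list in half (never called on [])
def segBuild : List Int → Seg
  | [] => .leaf 0
  | [c] => .leaf c
  | a :: b :: rest =>
      let l := a :: b :: rest
      let k := l.length / 2
      let lt := segBuild (l.take k)
      let rt := segBuild (l.drop k)
      .node (max lt.maxv rt.maxv) k lt rt
termination_by l => l.length
decreasing_by
  · simp; omega
  · simp; omega

-- Source B _query: leftmost leaf index with capacity ≥ v, or none
def segQuery (v : Int) : Seg → Option Nat
  | .leaf c => if v ≤ c then some 0 else none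
  | .node _ ls l r =>
      if v ≤ l.maxv then segQuery v l
      else
        match segQuery v r with
        | none => none
        | some j => some (ls + j)

-- Source B _update: subtract v at leaf index i, recomputing cached maxima
def segUpdate (i : Nat) (v : Int) : Seg → Seg
  | .leaf c => .leaf (c - v)
  | .node _ ls l r =>
      if i < ls then
        let l' := segUpdate i v l
        .node (max l'.maxv r.maxv) ls l' r
      else
        let r' := segUpdate (i - ls) v r
        .node (max l.maxv r'.maxv) ls l r'

-- Source B main loop ('ids[idx]' is in range whenever _query succeeds, so getD is exact)
def bLoop (ids : List Int) : List Int → Seg → PySem.Set Int → Option (List Int)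
  | [], _, used => some used
  | v :: vs, t, used =>
      match segQuery v t with
      | none => none
      | some idx => bLoop ids vs (segUpdate idx v t) (PySem.Set.add used (ids.getD idx 0))

def vehicle_order_fit_slot_alt (vehicle_order : List Int) (location_slots : List (Int × Int)) : Option (List Int) :=
  match location_slots with
  | [] => match vehicle_order with
          | [] => some PySem.Set.empty
          | _ :: _ => none
  | _ :: _ =>
      bLoop (location_slots.map Prod.fst) vehicle_order
        (segBuild (location_slots.map Prod.snd)) PySem.Set.empty

-- ===== PRECONDITION & SPEC =====
def Spec_vehicle_order_fit_slot (vehicle_order : List Int) (location_slots : List (Int × Int)) (out : Option (List Int)) : Prop := out = vehicle_order_fit_slot_alt vehicle_order location_slots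
instance (vehicle_order : List Int) (location_slots : List (Int × Int)) (out : Option (List Int)) : Decidable (Spec_vehicle_order_fit_slot vehicle_order location_slots out) := by unfold Spec_vehicle_order_fit_slot; infer_instance

-- ===== CLAIM (what is proved, stated in full; the proofs are below) =====
def Claim_equal_vehicle_order_fit_slot : Prop := ∀ (vehicle_order : List Int) (location_slots : List (Int × Int)), Dom_vehicle_order_fit_slot vehicle_order location_slots → Spec_vehicle_order_fit_slot vehicle_order location_slots (vehicle_order_fit_slot vehicle_order location_slots)

-- ===== LEMMAS AND PROOFS =====

def Seg.toList : Seg → List Int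
  | .leaf c => [c]
  | .node _ _ l r => l.toList ++ r.toList

def Seg.wf : Seg → Prop
  | .leaf _ => True
  | .node mx ls l r => mx = max l.maxv r.maxv ∧ ls = l.toList.length ∧ l.wf ∧ r.wf

theorem seg_maxv_le_iff (t : Seg) (h : Seg.wf t) (v : Int) :
    v ≤ t.maxv ↔ ∃ c ∈ t.toList, v ≤ c := by
  induction t with
  | leaf c => simp [Seg.maxv, Seg.toList]
  | node mx ls l r ihl ihr =>
      obtain ⟨hmx, _, hl, hr⟩ := h
      constructor
      · intro hv
        rcases le_max_iff.mp (hmx ▸ hv) with h' | h'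
        · obtain ⟨c, hc, hvc⟩ := (ihl hl).mp h'
          exact ⟨c, List.mem_append.mpr (Or.inl hc), hvc⟩
        · obtain ⟨c, hc, hvc⟩ := (ihr hr).mp h'
          exact ⟨c, List.mem_append.mpr (Or.inr hc), hvc⟩
      · rintro ⟨c, hc, hvc⟩
        rcases List.mem_append.mp hc with h' | h'
        · exact hmx ▸ le_max_iff.mpr (Or.inl ((ihl hl).mpr ⟨c, h', hvc⟩))
        · exact hmx ▸ le_max_iff.mpr (Or.inr ((ihr hr).mpr ⟨c, h', hvc⟩))

theorem seg_query_eq (t : Seg) (h : Seg.wf t) (v : Int) :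
    segQuery v t = List.findIdx? (fun c => v ≤ c) t.toList := by
  induction t with
  | leaf c => simp [segQuery, Seg.toList, List.findIdx?_cons]
  | node mx ls l r ihl ihr =>
      obtain ⟨hmx, hls, hl, hr⟩ := h
      simp only [Seg.toList, List.findIdx?_append]
      by_cases hv : v ≤ l.maxv
      · rw [segQuery, if_pos hv, ihl hl]
        cases hfl : List.findIdx? (fun c => decide (v ≤ c)) l.toList with
        | none =>
            exfalso
            rw [List.findIdx?_eq_none_iff] at hfl
            obtain ⟨c, hc, hvc⟩ := (seg_maxv_le_iff l hl v).mp hv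
            have := hfl c hc
            simp at this
            omega
        | some i => simp [Option.or]
      · have hfl : List.findIdx? (fun c => decide (v ≤ c)) l.toList = none := by
          rw [List.findIdx?_eq_none_iff]
          intro c hc
          simp only [decide_eq_false_iff_not]
          intro hvc
          exact hv ((seg_maxv_le_iff l hl v).mpr ⟨c, hc, hvc⟩)
        rw [segQuery, if_neg hv, ihr hr, hfl]
        cases hfr : List.findIdx? (fun c => decide (v ≤ c)) r.toList with
        | none => simp
        | some j => simp [Option.or, hls]; omega

theorem seg_update_spec (t : Seg) (i : Nat) (v : Int) (h : Seg.wf t)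
    (hi : i < t.toList.length) :
    (segUpdate i v t).toList = t.toList.set i (t.toList.getD i 0 - v) ∧
      Seg.wf (segUpdate i v t) := by
  induction t generalizing i with
  | leaf c =>
      simp only [Seg.toList, List.length_singleton] at hi
      interval_cases i
      simp [segUpdate, Seg.toList, Seg.wf]
  | node mx ls l r ihl ihr =>
      obtain ⟨hmx, hls, hl, hr⟩ := h
      subst hls
      simp only [Seg.toList, List.length_append] at hi
      by_cases hcase : i < l.toList.length
      · obtain ⟨htl, hwf⟩ := ihl i hl hcase
        rw [segUpdate, if_pos hcase]
        refine ⟨?_, rfl, by rw [htl]; simp, hwf, hr⟩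
        simp only [Seg.toList]
        rw [List.getD_eq_getElem?_getD, List.getElem?_append, if_pos hcase,
          List.set_append, if_pos hcase, htl, List.getD_eq_getElem?_getD]
      · have hi' : i - l.toList.length < r.toList.length := by omega
        obtain ⟨htl, hwf⟩ := ihr (i - l.toList.length) hr hi'
        rw [segUpdate, if_neg hcase]
        refine ⟨?_, rfl, rfl, hl, hwf⟩
        simp only [Seg.toList]
        rw [List.getD_eq_getElem?_getD, List.getElem?_append, if_neg hcase,
          List.set_append, if_neg hcase, htl, List.getD_eq_getElem?_getD]

theorem seg_build_spec : ∀ (l : List Int), l ≠ [] →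
    (segBuild l).toList = l ∧ Seg.wf (segBuild l) := by
  intro l
  induction l using segBuild.induct with
  | case1 => intro h; exact absurd rfl h
  | case2 c =>
      intro _
      rw [segBuild]
      exact ⟨rfl, trivial⟩
  | case3 a b rest l k ihl ihr =>
      intro _
      have hl : l = a :: b :: rest := rfl
      have hk : k = (a :: b :: rest).length / 2 := rfl
      rw [hk, hl] at ihl ihr
      have hlen : 2 ≤ (a :: b :: rest).length := by simp
      have hk1 : 1 ≤ (a :: b :: rest).length / 2 := by omega
      have hk2 : (a :: b :: rest).length / 2 < (a :: b :: rest).length := by omega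
      have htake : (a :: b :: rest).take ((a :: b :: rest).length / 2) ≠ [] := by
        intro h
        have := congrArg List.length h
        simp only [List.length_take, List.length_nil] at this
        omega
      have hdrop : (a :: b :: rest).drop ((a :: b :: rest).length / 2) ≠ [] := by
        intro h
        have := congrArg List.length h
        simp only [List.length_drop, List.length_nil] at this
        omega
      obtain ⟨htl1, hwf1⟩ := ihl htake
      obtain ⟨htl2, hwf2⟩ := ihr hdrop
      rw [segBuild]
      refine ⟨?_, rfl, ?_, hwf1, hwf2⟩
      · simp only [Seg.toList, htl1, htl2, List.take_append_drop]
      · rw [htl1]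
        simp only [List.length_take]
        omega

theorem aFind_eq (v : Int) (slots : List (Int × Int)) :
    aFind v slots =
      match List.findIdx? (fun s => v ≤ s.2) slots with
      | none => none
      | some i => some (slots.set i ((slots.getD i (0, 0)).1, (slots.getD i (0, 0)).2 - v),
                        (slots.getD i (0, 0)).1) := by
  induction slots with
  | nil => simp [aFind]
  | cons s rest ih =>
      by_cases hp : v ≤ s.2
      · simp [aFind, hp, List.findIdx?_cons]
      · rw [aFind, if_neg hp, ih]
        rw [List.findIdx?_cons, if_neg (by simp [hp])]
        cases List.findIdx? (fun s => decide (v ≤ s.2)) rest with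
        | none => simp
        | some i => simp [List.getD]

theorem loop_eq (vs : List Int) : ∀ (slots : List (Int × Int)) (t : Seg)
    (used ids : PySem.Set Int), Seg.wf t → t.toList = slots.map Prod.snd →
    ids = slots.map Prod.fst → bLoop ids vs t used = aLoop vs slots used := by
  induction vs with
  | nil => intro slots t used ids _ _ _; rfl
  | cons v vs ih =>
      intro slots t used ids hwf htl hids
      rw [bLoop, aLoop, seg_query_eq t hwf v, htl, List.findIdx?_map, aFind_eq]
      have hcomp : ((fun c => decide (v ≤ c)) ∘ Prod.snd : Int × Int → Bool)
          = fun s => decide (v ≤ s.2) := rfl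
      rw [hcomp]
      cases hfi : List.findIdx? (fun s => decide (v ≤ s.2)) slots with
      | none => rfl
      | some i =>
          dsimp only
          have hilt : i < slots.length :=
            (List.findIdx?_eq_some_iff_findIdx_eq.mp hfi).1
          have hgd : slots.getD i (0, 0) = slots[i] := by
            rw [List.getD_eq_getElem?_getD, List.getElem?_eq_getElem hilt]; rfl
          have hid : ids.getD i 0 = (slots.getD i (0, 0)).1 := by
            rw [hids, List.getD_eq_getElem?_getD, List.getElem?_map,
              List.getElem?_eq_getElem hilt, hgd]; rfl
          have hit : i < t.toList.length := by rw [htl]; simpa using hilt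
          obtain ⟨hutl, huwf⟩ := seg_update_spec t i v hwf hit
          rw [hid]
          apply ih
          · exact huwf
          · rw [hutl, htl, List.map_set, hgd]
            congr 1
            rw [List.getD_eq_getElem?_getD, List.getElem?_map,
              List.getElem?_eq_getElem hilt]
            rfl
          · rw [List.map_set, hgd, hids]
            have hlt' : i < (List.map Prod.fst slots).length := by
              simpa using hilt
            have h1 : ((slots[i].1, slots[i].2 - v) : Int × Int).1
                = (List.map Prod.fst slots)[i]'hlt' := by
              rw [List.getElem_map]
            rw [h1, List.set_getElem_self]

-- ===== VERDICT (by name: the statement is the Claim_ definition above) =====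
theorem vehicle_order_fit_slot_spec : Claim_equal_vehicle_order_fit_slot := by
  unfold Claim_equal_vehicle_order_fit_slot
  intro vo ls _
  unfold Spec_vehicle_order_fit_slot vehicle_order_fit_slot vehicle_order_fit_slot_alt
  cases ls with
  | nil =>
      cases vo with
      | nil => rfl
      | cons v vs => simp [aLoop, aFind]
  | cons s rest =>
      obtain ⟨htl, hwf⟩ := seg_build_spec ((s :: rest).map Prod.snd) (by simp)
      exact (loop_eq vo (s :: rest) _ PySem.Set.empty _ hwf htl rfl).symm
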